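-- pv_equiv track=rewrite | github.com/anshsgit/sql-syntax-checker | select/helper/groupByChecksHelper.py | stripAlias
-- ===== SOURCE A (Python) =====
-- def stripAlias(expr):
--     """
--     Removes explicit alias from a SELECT expression.
--     Only strips top-level AS aliases.
--     """
--     depth = 0
--     for i, tok in enumerate(expr):
--         if tok == "(":
--             depth += 1
--         elif tok == ")":
--             depth -= 1
--
--         # Alias must be top-level
--         if depth == 0 and tok == "as":
--             return expr[:i]
--
--     return expr
-- ===== SOURCE B (Python) =====
-- def stripAlias(expr):
--     """
--     Removes explicit alias from a SELECT expression.
--     Only strips top-level AS aliases.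
--     Candidate-based: no running depth counter.  Stage 1 collects the
--     positions of "as" tokens; stage 2 returns the prefix before the first
--     candidate whose prefix is parenthesis-balanced (equal counts).
--     """
--     cands = [i for i, tok in enumerate(expr) if tok == "as"]
--     for i in cands:
--         pre = expr[:i]
--         if pre.count("(") == pre.count(")"):
--             return pre
--     return expr
-- ===== Notes on version B (the rewrite author's own statement) =====
-- stated objective: alternative
-- what changed: Drops the incremental depth counter entirely: B first collects the indices of all 'as' tokens, then returns the prefix before the first candidate whose prefix contains equally many '(' and ')' (balance tested by counting the slice, not by a running depth).
import Mathlib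
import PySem

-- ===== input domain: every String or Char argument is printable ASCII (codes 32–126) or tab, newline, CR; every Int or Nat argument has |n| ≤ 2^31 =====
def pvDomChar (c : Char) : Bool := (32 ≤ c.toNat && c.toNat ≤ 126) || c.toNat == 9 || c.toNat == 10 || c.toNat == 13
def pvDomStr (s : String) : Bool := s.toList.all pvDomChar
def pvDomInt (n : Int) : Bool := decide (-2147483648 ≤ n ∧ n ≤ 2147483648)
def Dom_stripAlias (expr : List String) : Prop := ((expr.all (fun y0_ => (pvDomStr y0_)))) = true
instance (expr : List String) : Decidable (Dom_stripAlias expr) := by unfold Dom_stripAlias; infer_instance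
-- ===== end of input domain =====

-- B replaces A's running depth counter by candidate 'as' positions plus a balance test
-- by counting the prefix; an alternative decomposition with the same result.

-- ===== PORT A =====
-- A's fused loop: enumerate with a depth counter and an early return of expr[:i].
def stripAliasGo (orig : List String) (rest : List String) (i : Nat) (depth : Int) : List String :=
  match rest with
  | [] => orig
  | tok :: rs =>
    let depth := if tok = "(" then depth + 1 else if tok = ")" then depth - 1 else depth
    if depth = 0 ∧ tok = "as" then orig.take i
    else stripAliasGo orig rs (i + 1) depth

def stripAlias (expr : List String) : List String :=
  stripAliasGo expr expr 0 0

-- ===== PORT B =====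
-- stage 1: candidate positions of "as" (Python: [i for i, tok in enumerate(expr) if tok == "as"])
def altCands (toks : List String) (i : Nat) : List Nat :=
  match toks with
  | [] => []
  | tok :: rs => if tok = "as" then i :: altCands rs (i + 1) else altCands rs (i + 1)

-- stage 2: first candidate whose prefix is parenthesis-balanced (Python: for i in cands: ...)
def altScan (expr : List String) (cands : List Nat) : List String :=
  match cands with
  | [] => expr
  | i :: rest =>
    let pre := expr.take i
    if pre.count "(" = pre.count ")" then pre else altScan expr rest

def stripAlias_alt (expr : List String) : List String :=
  altScan expr (altCands expr 0)

-- ===== PRECONDITION & SPEC =====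
def Spec_stripAlias (expr : List String) (out : List String) : Prop := out = stripAlias_alt expr
instance (expr : List String) (out : List String) : Decidable (Spec_stripAlias expr out) := by unfold Spec_stripAlias; infer_instance

-- ===== CLAIM (what is proved, stated in full; the proofs are below) =====
def Claim_equal_stripAlias : Prop := ∀ (expr : List String), Dom_stripAlias expr → Spec_stripAlias expr (stripAlias expr)

-- ===== LEMMAS AND PROOFS =====
lemma go_eq (rest : List String) : ∀ (orig : List String) (i : Nat) (d : Int),
    rest = orig.drop i →
    d = ((orig.take i).count "(" : Int) - ((orig.take i).count ")" : Int) →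
    stripAliasGo orig rest i d = altScan orig (altCands rest i) := by
  induction rest with
  | nil => intro orig i d _ _; simp [stripAliasGo, altCands, altScan]
  | cons tok rs ih =>
    intro orig i d hdrop hd
    have hget : orig[i]? = some tok := by
      have h : (List.drop i orig)[0]? = some tok := by rw [← hdrop]; rfl
      simpa using h
    have hrs : rs = orig.drop (i + 1) := by
      have h := congrArg (List.drop 1) hdrop
      simpa [List.drop_drop, Nat.add_comm] using h
    have htake : orig.take (i + 1) = orig.take i ++ [tok] := by
      rw [List.take_add_one, hget]; rfl
    simp only [stripAliasGo, altCands]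
    by_cases has : tok = "as"
    · subst has
      have hd' : (if ("as" : String) = "(" then d + 1 else if ("as" : String) = ")" then d - 1 else d) = d := by
        simp
      rw [hd']
      by_cases h0 : d = 0
      · have hcnt : (orig.take i).count "(" = (orig.take i).count ")" := by omega
        simp [altScan, h0, hcnt]
      · have hcnt : ¬ (orig.take i).count "(" = (orig.take i).count ")" := by omega
        rw [if_neg (show ¬(d = 0 ∧ ("as" : String) = "as") by simp [h0])]
        simp only [if_true, altScan, if_neg hcnt]
        exact ih orig (i + 1) d hrs (by rw [htake]; simp [List.count_append]; omega)
    · have hcond : ¬ ((if tok = "(" then d + 1 else if tok = ")" then d - 1 else d) = 0 ∧ tok = "as") := by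
        simp [has]
      rw [if_neg hcond, if_neg has]
      refine ih orig (i + 1) _ hrs ?_
      rw [htake]
      by_cases h1 : tok = "(" <;> by_cases h2 : tok = ")" <;>
        simp_all [List.count_append] <;> omega

-- ===== VERDICT (by name: the statement is the Claim_ definition above) =====
theorem stripAlias_spec : Claim_equal_stripAlias := by
  intro expr _
  unfold Spec_stripAlias stripAlias stripAlias_alt
  exact go_eq expr expr 0 0 (by simp) (by simp)
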